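-- pv_equiv track=rewrite | github.com/xalanq/Router-Lab | fuck.py | fuck
-- ===== SOURCE A (Python) =====
-- name={
--     0x88:"[table]",
--     0x99:"[update]",
-- }
--
-- def fuck(arr):
--     cnt=0
--     i=0
--     for i in range(len(arr)):
--         if arr[i] in name.keys():
--             cnt+=1
--         if cnt==3:
--             break
--     return i, (arr[i] if i<len(arr) else 0x00)
-- ===== SOURCE B (Python) =====
-- SPECIALS = (0x88, 0x99)
--
-- def fuck(arr):
--     specials = [idx for idx, v in enumerate(arr) if v in SPECIALS]
--     if len(specials) >= 3:
--         i = specials[2]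
--     elif arr:
--         i = len(arr) - 1
--     else:
--         i = 0
--     return i, (arr[i] if i < len(arr) else 0x00)
-- ===== Notes on version B (the rewrite author's own statement) =====
-- stated objective: alternative
-- what changed: Replaces the count-while-scanning loop with an early break by a build-then-select decomposition: collect all indices of special bytes once, then pick the third (or the last index / 0 as fallback).
import Mathlib
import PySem

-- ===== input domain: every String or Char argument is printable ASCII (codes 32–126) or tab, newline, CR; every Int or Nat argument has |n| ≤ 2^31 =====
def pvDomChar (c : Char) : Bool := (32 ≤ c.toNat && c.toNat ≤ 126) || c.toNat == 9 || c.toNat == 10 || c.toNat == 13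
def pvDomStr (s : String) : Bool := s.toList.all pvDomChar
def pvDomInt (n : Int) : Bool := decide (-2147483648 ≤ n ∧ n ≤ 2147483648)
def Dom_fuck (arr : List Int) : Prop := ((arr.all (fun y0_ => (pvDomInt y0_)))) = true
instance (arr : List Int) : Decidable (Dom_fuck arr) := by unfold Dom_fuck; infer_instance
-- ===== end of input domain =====

-- B collects all special-byte indices first and selects the third (build-then-select) instead of A's
-- count-while-scanning loop with an early break; same cost, different control flow (objective: alternative).

-- ===== PORT A =====
-- the keys of A's module-level dict `name`
def nameKeys : List Int := [0x88, 0x99]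

-- the for-loop over range(len(arr)) with the `break`; i is the loop variable, cnt the counter.
-- fuel = arr.length - i makes the recursion structural; arr.getD i 0 is exact for arr[i] (i is in range here).
def fuckLoop (arr : List Int) : Nat → Int → Nat → Nat
  | 0, _cnt, i => i
  | fuel + 1, cnt, i =>
    if i < arr.length then
      let cnt' := if nameKeys.contains (arr.getD i 0) then cnt + 1 else cnt
      if cnt' = 3 then i
      else if i + 1 < arr.length then fuckLoop arr fuel cnt' (i + 1)
      else i
    else i

def fuck (arr : List Int) : Int × Int :=
  let i := fuckLoop arr arr.length 0 0
  ((i : Int), if i < arr.length then arr.getD i 0 else 0x00)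

-- ===== PORT B =====
-- [idx for idx, v in enumerate(arr) if v in SPECIALS]
def fuckSpecials (arr : List Int) : List Int :=
  ((PySem.List.enumerate arr).filter (fun p => nameKeys.contains p.2)).map (fun p => p.1)

def fuck_alt (arr : List Int) : Int × Int :=
  let specials := fuckSpecials arr
  let i : Int :=
    if 3 ≤ specials.length then PySem.List.pyGetD specials 2 0
    else if arr ≠ [] then (arr.length : Int) - 1
    else 0
  (i, if i < (arr.length : Int) then PySem.List.pyGetD arr i 0 else 0x00)

-- ===== PRECONDITION & SPEC =====
def Spec_fuck (arr : List Int) (out : Int × Int) : Prop := out = fuck_alt arr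
instance (arr : List Int) (out : Int × Int) : Decidable (Spec_fuck arr out) := by unfold Spec_fuck; infer_instance

-- ===== CLAIM (what is proved, stated in full; the proofs are below) =====
def Claim_equal_fuck : Prop := ∀ (arr : List Int), Dom_fuck arr → Spec_fuck arr (fuck arr)

-- ===== LEMMAS AND PROOFS =====

/-- Position of the k-th (0-based) special element of `l`, if any. Proof-side characterisation. -/
def thirdIdx? (l : List Int) (k : Nat) : Option Nat :=
  match l with
  | [] => none
  | x :: xs =>
    if nameKeys.contains x then
      if k = 0 then some 0 else (thirdIdx? xs (k - 1)).map Nat.succ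
    else (thirdIdx? xs k).map Nat.succ

theorem thirdIdx?_lt {l : List Int} {k j : Nat} (h : thirdIdx? l k = some j) : j < l.length := by
  induction l generalizing k j with
  | nil => simp [thirdIdx?] at h
  | cons x xs ih =>
    simp only [thirdIdx?] at h
    split_ifs at h with h1 h2
    · simp at h; simp; omega
    · rcases Option.map_eq_some_iff.1 h with ⟨j', hj', rfl⟩
      have := ih hj'; simp; omega
    · rcases Option.map_eq_some_iff.1 h with ⟨j', hj', rfl⟩
      have := ih hj'; simp; omega

theorem specials_getElem? (l : List Int) (s : Int) (k : Nat) :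
    (((PySem.List.enumerate l s).filter (fun p => nameKeys.contains p.2)).map (fun p => p.1))[k]? =
      (thirdIdx? l k).map (fun j => s + (j : Int)) := by
  induction l generalizing s k with
  | nil => simp [PySem.List.enumerate_nil, thirdIdx?]
  | cons x xs ih =>
    rw [PySem.List.enumerate_cons]
    by_cases hx : x ∈ nameKeys
    · have hxb : nameKeys.contains x = true := by simpa using hx
      cases k with
      | zero =>
        rw [List.filter_cons_of_pos (by simpa using hx)]
        simp [thirdIdx?, hx]
      | succ k' =>
        rw [List.filter_cons_of_pos (by simpa using hx), List.map_cons,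
          List.getElem?_cons_succ, ih]
        simp only [thirdIdx?, hxb, if_true, Nat.add_sub_cancel, Nat.succ_ne_zero, if_false]
        cases thirdIdx? xs k' <;> simp <;> omega
    · have hxb : nameKeys.contains x = false := by simpa using hx
      rw [List.filter_cons_of_neg (by simpa using hx), ih]
      simp only [thirdIdx?, hxb, Bool.false_eq_true, if_false]
      cases thirdIdx? xs k <;> simp <;> omega

theorem fuckLoop_eq (arr : List Int) :
    ∀ (fuel i : Nat) (cnt : Int), arr.length ≤ fuel + i → i < arr.length → 0 ≤ cnt → cnt < 3 →
      fuckLoop arr fuel cnt i =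
        (match thirdIdx? (arr.drop i) (2 - cnt).toNat with
         | some j => i + j
         | none => arr.length - 1) := by
  intro fuel
  induction fuel with
  | zero => intro i cnt hn hi _ _; omega
  | succ fuel ih =>
    intro i cnt hn hi hc0 hc3
    have hdrop : arr.drop i = arr[i] :: arr.drop (i + 1) := List.drop_eq_getElem_cons hi
    have hget : arr.getD i 0 = arr[i] := List.getD_eq_getElem arr 0 hi
    rw [fuckLoop, if_pos hi, hdrop, hget]
    by_cases hx : arr[i] ∈ nameKeys
    · by_cases hc2 : cnt = 2
      · subst hc2
        simp [hx, thirdIdx?]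
      · have hk0 : ¬ ((2 - cnt).toNat = 0) := by omega
        have hks : (2 - cnt).toNat - 1 = (2 - (cnt + 1)).toNat := by omega
        simp only [thirdIdx?]
        simp only [nameKeys] at hx ⊢
        simp [hx, hk0, show ¬(cnt + 1 = 3) by omega]
        rw [hks]
        by_cases h2 : i + 1 < arr.length
        · rw [if_pos h2, ih (i + 1) (cnt + 1) (by omega) h2 (by omega) (by omega)]
          cases h : thirdIdx? (arr.drop (i + 1)) (2 - (cnt + 1)).toNat with
          | some _v => simp; show i + 1 + _v = i + (_v + 1); omega
          | none => simp
        · rw [if_neg h2]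
          rw [List.drop_eq_nil_of_le (by omega : arr.length ≤ i + 1)]
          simp [thirdIdx?]; show i = arr.length - 1; omega
    · simp only [thirdIdx?]
      simp only [nameKeys] at hx ⊢
      simp [hx, show ¬(cnt = 3) by omega]
      by_cases h2 : i + 1 < arr.length
      · rw [if_pos h2, ih (i + 1) cnt (by omega) h2 hc0 hc3]
        cases h : thirdIdx? (arr.drop (i + 1)) (2 - cnt).toNat with
        | some _v => simp; show i + 1 + _v = i + (_v + 1); omega
        | none => simp
      · rw [if_neg h2]
        rw [List.drop_eq_nil_of_le (by omega : arr.length ≤ i + 1)]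
        simp [thirdIdx?]; show i = arr.length - 1; omega

-- ===== VERDICT (by name: the statement is the Claim_ definition above) =====
theorem fuck_spec : Claim_equal_fuck := by
  intro arr _
  unfold Spec_fuck
  rcases eq_or_ne arr [] with rfl | hne
  · decide
  · have hlen : 0 < arr.length := List.length_pos_iff.2 hne
    have hA := fuckLoop_eq arr arr.length 0 0 (by omega) hlen (by omega) (by omega)
    simp only [List.drop_zero, show ((2 : Int) - 0).toNat = 2 from rfl] at hA
    have hget2 : (fuckSpecials arr)[2]? = (thirdIdx? arr 2).map (fun j => (j : Int)) := by
      have := specials_getElem? arr 0 2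
      simpa [fuckSpecials] using this
    unfold fuck fuck_alt
    cases h3 : thirdIdx? arr 2 with
    | some j =>
      rw [h3] at hget2
      simp at hget2
      have hj : j < arr.length := thirdIdx?_lt h3
      have hlen2 : 2 < (fuckSpecials arr).length := by
        rcases List.getElem?_eq_some_iff.1 hget2 with ⟨h, _⟩
        exact h
      have hgd : PySem.List.pyGetD (fuckSpecials arr) 2 0 = (j : Int) := by
        rw [show (2 : Int) = ((2 : Nat) : Int) from rfl, PySem.List.pyGetD_natCast]
        simp [List.getD_eq_getElem?_getD, hget2]
      rw [hA, h3]
      simp only [Nat.zero_add]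
      rw [if_pos (by omega : 3 ≤ (fuckSpecials arr).length), hgd]
      have hji : ((j : Nat) : Int) < (arr.length : Int) := by exact_mod_cast hj
      rw [if_pos hj, if_pos hji, PySem.List.pyGetD_natCast]
    | none =>
      rw [h3] at hget2
      simp at hget2
      have hlen2 : ¬ 3 ≤ (fuckSpecials arr).length := by omega
      rw [hA, h3]
      have h1 : arr.length - 1 < arr.length := by omega
      have hcast : ((arr.length - 1 : Nat) : Int) = (arr.length : Int) - 1 := by omega
      have hval : PySem.List.pyGetD arr ((arr.length : Int) - 1) 0 = arr.getD (arr.length - 1) 0 := by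
        rw [← hcast, PySem.List.pyGetD_natCast]
      simp only [if_neg hlen2, if_pos hne, if_pos h1, hcast, hval,
        if_pos (show (arr.length : Int) - 1 < (arr.length : Int) by omega)]
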